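-- pv_equiv track=rewrite | github.com/wade-lab/Mtb_Ribo-RET | Ribo-RET ORF caller 9_3_21.py | ORFtranslator
-- ===== SOURCE A (Python) =====
-- def ORFtranslator(sequence):
--
--     aa_codes =  ['*'  ,'*'  ,'*'  ,'I'  ,'I'  ,'I'  ,'L'  ,'L'  ,'L'  ,'L'  ,'L'  ,'L'  ,'V'  ,'V'  ,'V'  ,'V'  ,'F'  ,'F'  ,'M'  ,'C'  ,'C'  ,'A'  ,'A'  ,'A'  ,'A'  ,'G'  ,'G'  ,'G'  ,'G'  ,'P'  ,'P'  ,'P'  ,'P'  ,'T'  ,'T'  ,'T'  ,'T'  ,'S'  ,'S'  ,'S'  ,'S'  ,'S'  ,'S'  ,'Y'  ,'Y'  ,'W'  ,'Q'  ,'Q'  ,'N'  ,'N'  ,'H'  ,'H'  ,'E'  ,'E'  ,'D'  ,'D'  ,'K'  ,'K'  ,'R'  ,'R'  ,'R'  ,'R'  ,'R'  ,'R'  ]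
--     aa_codons = ['TAA','TAG','TGA','ATT','ATC','ATA','CTT','CTC','CTA','CTG','TTA','TTG','GTT','GTC','GTA','GTG','TTT','TTC','ATG','TGT','TGC','GCT','GCC','GCA','GCG','GGT','GGC','GGA','GGG','CCT','CCC','CCA','CCG','ACT','ACC','ACA','ACG','TCT','TCC','TCA','TCG','AGT','AGC','TAT','TAC','TGG','CAA','CAG','AAT','AAC','CAT','CAC','GAA','GAG','GAT','GAC','AAA','AAG','CGT','CGC','CGA','CGG','AGA','AGG']
--
--     amino_acids_dict = {}
--
--     for i in range(0,len(aa_codes)):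
--         amino_acids_dict[aa_codons[i]] = aa_codes[i]
--
--     open_reading_frames = []
--
--     for k in range(0,3):
--         m = ""
--         for j in range(k,len(sequence),3):
--             if len(sequence[j:j+3])<3:
--                 break
--             m = m + amino_acids_dict[sequence[j:j+3]]
--         open_reading_frames.append(m)
--     return(open_reading_frames)
-- ===== SOURCE B (Python) =====
-- def ORFtranslator(sequence):
--     # genetic code as a 64-character string indexed by base-4 codon value (A=0,C=1,G=2,T=3)
--     bases = "ACGT"
--     aas = "KNKNTTTTRSRSIIMIQHQHPPPPRRRRLLLLEDEDAAAAGGGGVVVV*Y*YSSSS*CWCLFLF"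
--     frames = ["", "", ""]
--     for i in range(len(sequence) - 2):
--         code = 16 * bases.index(sequence[i]) + 4 * bases.index(sequence[i + 1]) + bases.index(sequence[i + 2])
--         frames[i % 3] += aas[code]
--     return frames
-- ===== Notes on version B (the rewrite author's own statement) =====
-- stated objective: alternative
-- what changed: Replaces A's codon->amino-acid dict and three strided per-frame passes (each with an incomplete-codon break) by a single sliding-window pass that computes each codon's base-4 value (A=0,C=1,G=2,T=3) and indexes a 64-character genetic-code string, appending to frame i % 3.
import Mathlib
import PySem

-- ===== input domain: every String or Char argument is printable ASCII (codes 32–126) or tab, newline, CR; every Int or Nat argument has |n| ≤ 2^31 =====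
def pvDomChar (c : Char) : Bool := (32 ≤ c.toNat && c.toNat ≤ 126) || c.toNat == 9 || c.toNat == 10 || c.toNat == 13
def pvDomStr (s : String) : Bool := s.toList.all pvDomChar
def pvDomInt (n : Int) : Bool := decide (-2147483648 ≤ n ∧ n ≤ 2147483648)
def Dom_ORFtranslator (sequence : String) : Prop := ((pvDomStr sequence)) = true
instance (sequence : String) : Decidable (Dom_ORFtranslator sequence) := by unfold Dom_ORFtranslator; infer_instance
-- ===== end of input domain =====

-- B drops A's codon→aa dict and three strided frame loops: one sliding-window pass computes each
-- codon's base-4 value and indexes a 64-character genetic-code string, distributing into frame i % 3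
-- (alternative decomposition and data structure, same cost).

-- ===== PORT A =====
def pvAAcodes : List String := ["*","*","*","I","I","I","L","L","L","L","L","L","V","V","V","V","F","F","M","C","C","A","A","A","A","G","G","G","G","P","P","P","P","T","T","T","T","S","S","S","S","S","S","Y","Y","W","Q","Q","N","N","H","H","E","E","D","D","K","K","R","R","R","R","R","R"]
def pvAAcodons : List String := ["TAA","TAG","TGA","ATT","ATC","ATA","CTT","CTC","CTA","CTG","TTA","TTG","GTT","GTC","GTA","GTG","TTT","TTC","ATG","TGT","TGC","GCT","GCC","GCA","GCG","GGT","GGC","GGA","GGG","CCT","CCC","CCA","CCG","ACT","ACC","ACA","ACG","TCT","TCC","TCA","TCG","AGT","AGC","TAT","TAC","TGG","CAA","CAG","AAT","AAC","CAT","CAC","GAA","GAG","GAT","GAC","AAA","AAG","CGT","CGC","CGA","CGG","AGA","AGG"]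

-- A's dict-building loop: for i in range(0, len(aa_codes)): amino_acids_dict[aa_codons[i]] = aa_codes[i]
def pvDictA : PySem.Dict String String :=
  (PySem.List.pyRange 0 (PySem.List.len pvAAcodes) 1).foldl
    (fun d i => d.insert (PySem.List.pyGetD pvAAcodons i "") (PySem.List.pyGetD pvAAcodes i ""))
    PySem.Dict.empty

-- A's inner loop over j with the incomplete-codon break; amino_acids_dict[...] raises KeyError on a
-- missing codon (excluded by Pre_), ported as getD with a default.
def pvFrameA (d : PySem.Dict String String) (s : String) : List Int → String → String
  | [], m => m
  | j :: rest, m =>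
      if PySem.Str.len (PySem.Str.slice s (some j) (some (j + 3))) < 3 then m
      else pvFrameA d s rest (m ++ d.getD (PySem.Str.slice s (some j) (some (j + 3))) "")

def ORFtranslator (sequence : String) : List String :=
  (PySem.List.pyRange 0 3 1).foldl
    (fun acc k => acc ++ [pvFrameA pvDictA sequence (PySem.List.pyRange k (PySem.Str.len sequence) 3) ""])
    []

-- ===== PORT B =====
def pvBases : String := "ACGT"
def pvAAs : String := "KNKNTTTTRSRSIIMIQHQHPPPPRRRRLLLLEDEDAAAAGGGGVVVV*Y*YSSSS*CWCLFLF"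

-- bases.index(ch): Python raises ValueError when ch ∉ "ACGT" (excluded by Pre_); ported as find,
-- which is exact (the first-occurrence index) whenever ch occurs in "ACGT".
def pvBIdx (ch : Char) : Int := PySem.Str.find pvBases (String.mk [ch])

-- one step of B's loop body: sequence[i], sequence[i+1], sequence[i+2] fetched, the codon's base-4
-- value computed, aas[code] looked up (aas[...] out of range only outside Pre_, ported as "").
def pvStepB (s : String) (i : Int) : String :=
  match PySem.Str.pyGet? s i, PySem.Str.pyGet? s (i + 1), PySem.Str.pyGet? s (i + 2) with
  | some a, some b, some c =>
      match PySem.Str.pyGet? pvAAs (16 * pvBIdx a + 4 * pvBIdx b + pvBIdx c) with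
      | some ch => String.mk [ch]
      | none => ""
  | _, _, _ => ""

-- frames = ["", "", ""] kept as a triple; frames[i % 3] += aas[code]
def ORFtranslator_alt (sequence : String) : List String :=
  let res := (PySem.List.pyRange 0 (PySem.Str.len sequence - 2) 1).foldl
    (fun (fr : String × String × String) i =>
      let aa := pvStepB sequence i
      if PySem.Int.mod i 3 = 0 then (fr.1 ++ aa, fr.2.1, fr.2.2)
      else if PySem.Int.mod i 3 = 1 then (fr.1, fr.2.1 ++ aa, fr.2.2)
      else (fr.1, fr.2.1, fr.2.2 ++ aa))
    ("", "", "")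
  [res.1, res.2.1, res.2.2]

-- ===== PRECONDITION & SPEC =====
-- Pre_ excludes exactly the inputs on which Python A raises KeyError: a sequence of length ≥ 3
-- containing a character other than uppercase A/C/G/T (some 3-character window is then not a dict
-- key); B raises ValueError on those same inputs.
def Pre_ORFtranslator (sequence : String) : Prop :=
  PySem.Str.len sequence < 3 ∨ sequence.toList.all (fun c => decide (c ∈ (['A','C','G','T'] : List Char))) = true
instance (sequence : String) : Decidable (Pre_ORFtranslator sequence) := by unfold Pre_ORFtranslator; infer_instance
def pvWitness_ORFtranslator : String := "ATGAAATAG"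

def Spec_ORFtranslator (sequence : String) (out : List String) : Prop := out = ORFtranslator_alt sequence
instance (sequence : String) (out : List String) : Decidable (Spec_ORFtranslator sequence out) := by unfold Spec_ORFtranslator; infer_instance

-- ===== CLAIM (what is proved, stated in full; the proofs are below) =====
def Claim_equal_ORFtranslator : Prop := ∀ (sequence : String), Dom_ORFtranslator sequence → Pre_ORFtranslator sequence → Spec_ORFtranslator sequence (ORFtranslator sequence)

-- ===== LEMMAS AND PROOFS =====

-- the per-position codon translation performed by A
def pvF (s : String) (j : Int) : String := pvDictA.getD (PySem.Str.slice s (some j) (some (j + 3))) ""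

-- concatenation of the A-side translations of a list of positions
def pvCat (s : String) : List Int → String
  | [] => ""
  | j :: r => pvF s j ++ pvCat s r

-- concatenation of the B-side translations of a list of positions
def pvCatB (s : String) : List Int → String
  | [] => ""
  | j :: r => pvStepB s j ++ pvCatB s r

-- a three-character window of the list, elementwise
theorem pvWindow (xs : List Char) (n : Nat) (h : n + 3 ≤ xs.length) :
    (xs.drop n).take 3 = [xs[n], xs[n + 1], xs[n + 2]] := by
  rw [List.drop_eq_getElem_cons (by omega), List.drop_eq_getElem_cons (by omega),
      List.drop_eq_getElem_cons (by omega)]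
  rfl

-- the finite heart: on each of the 64 ACGT codons the dict lookup equals the base-4 string lookup
set_option maxRecDepth 40000 in
theorem pvCode (a b c : Char) (ha : a ∈ (['A','C','G','T'] : List Char))
    (hb : b ∈ (['A','C','G','T'] : List Char)) (hc : c ∈ (['A','C','G','T'] : List Char)) :
    pvDictA.getD (String.mk [a, b, c]) "" =
      (match PySem.Str.pyGet? pvAAs (16 * pvBIdx a + 4 * pvBIdx b + pvBIdx c) with
        | some ch => String.mk [ch]
        | none => "") := by
  fin_cases ha <;> fin_cases hb <;> fin_cases hc <;> decide

-- the two per-position translations agree on full in-range codons made of A/C/G/T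
theorem pvStep_eq (s : String) (j : Int) (h0 : 0 ≤ j) (h3 : j + 3 ≤ (s.toList.length : Int))
    (hall : ∀ c ∈ s.toList, c ∈ (['A','C','G','T'] : List Char)) :
    pvF s j = pvStepB s j := by
  have hlen : j.toNat + 3 ≤ s.toList.length := by omega
  have hkey : (PySem.Str.slice s (some j) (some (j + 3))).toList =
      [s.toList[j.toNat], s.toList[j.toNat + 1], s.toList[j.toNat + 2]] := by
    simp only [PySem.Str.toList_slice, PySem.Chars.slice_eq_listSlice]
    rw [PySem.List.slice_toNat]
    · have h9 : (j + 3).toNat - j.toNat = 3 := by omega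
      rw [h9, pvWindow s.toList j.toNat hlen]
    all_goals omega
  have hget : ∀ k : Nat, PySem.Str.pyGet? s (((j.toNat + k : Nat) : Int)) = s.toList[j.toNat + k]? :=
    fun k => PySem.Str.pyGet?_natCast s (j.toNat + k)
  have g0 : PySem.Str.pyGet? s j = some (s.toList[j.toNat]'(by omega)) := by
    have h := hget 0
    rw [List.getElem?_eq_getElem (by omega)] at h
    conv_lhs => rw [show j = ((j.toNat + 0 : Nat) : Int) by omega]
    exact h
  have g1 : PySem.Str.pyGet? s (j + 1) = some (s.toList[j.toNat + 1]'(by omega)) := by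
    have h := hget 1
    rw [List.getElem?_eq_getElem (by omega)] at h
    conv_lhs => rw [show j + 1 = ((j.toNat + 1 : Nat) : Int) by omega]
    exact h
  have g2 : PySem.Str.pyGet? s (j + 2) = some (s.toList[j.toNat + 2]'(by omega)) := by
    have h := hget 2
    rw [List.getElem?_eq_getElem (by omega)] at h
    conv_lhs => rw [show j + 2 = ((j.toNat + 2 : Nat) : Int) by omega]
    exact h
  have hkeyS : PySem.Str.slice s (some j) (some (j + 3)) =
      String.mk [s.toList[j.toNat], s.toList[j.toNat + 1], s.toList[j.toNat + 2]] := by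
    have := congrArg String.mk hkey
    simpa using this
  unfold pvF pvStepB
  rw [hkeyS, g0, g1, g2]
  exact pvCode _ _ _ (hall _ (by simp)) (hall _ (by simp)) (hall _ (by simp))

theorem pvSliceLen (s : String) (j : Int) (h0 : 0 ≤ j) :
    PySem.Str.len (PySem.Str.slice s (some j) (some (j + 3))) =
      min (j + 3) (s.toList.length) - min j (s.toList.length) := by
  simp [pysem, PySem.List.length_slice, PySem.List.clampIdx]
  split_ifs <;> omega

-- A's frame loop on positions that all carry a full codon, followed by the position it stops at
theorem pvFrameA_full (s : String) (P Q : List Int) (m : String)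
    (hP : ∀ j ∈ P, 0 ≤ j ∧ j + 3 ≤ (s.toList.length : Int))
    (hQ : ∀ q, Q.head? = some q → 0 ≤ q ∧ (s.toList.length : Int) - 2 ≤ q) :
    pvFrameA pvDictA s (P ++ Q) m = m ++ pvCat s P := by
  induction P generalizing m with
  | nil =>
    simp [pvCat]
    cases Q with
    | nil => simp [pvFrameA]
    | cons q r =>
      obtain ⟨h0, h2⟩ := hQ q rfl
      simp only [pvFrameA]
      rw [if_pos (by rw [pvSliceLen s q h0]; omega)]
  | cons j t ih =>
    obtain ⟨h0, h3⟩ := hP j (by simp)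
    simp only [List.cons_append, pvFrameA]
    rw [if_neg (by rw [pvSliceLen s j h0]; omega)]
    rw [ih _ (fun x hx => hP x (List.mem_cons_of_mem _ hx))]
    simp [pvCat, pvF, String.append_assoc]

-- B's one-pass fold distributes each position into the frame selected by i % 3
theorem pvFoldB (s : String) (js : List Int) (a b c : String) :
    js.foldl
      (fun (fr : String × String × String) i =>
        let aa := pvStepB s i
        if PySem.Int.mod i 3 = 0 then (fr.1 ++ aa, fr.2.1, fr.2.2)
        else if PySem.Int.mod i 3 = 1 then (fr.1, fr.2.1 ++ aa, fr.2.2)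
        else (fr.1, fr.2.1, fr.2.2 ++ aa)) (a, b, c) =
      (a ++ pvCatB s (js.filter (fun i => PySem.Int.mod i 3 == 0)),
       b ++ pvCatB s (js.filter (fun i => PySem.Int.mod i 3 == 1)),
       c ++ pvCatB s (js.filter (fun i => PySem.Int.mod i 3 == 2))) := by
  induction js generalizing a b c with
  | nil => simp [pvCatB]
  | cons i t ih =>
    simp only [List.foldl_cons, List.filter_cons]
    by_cases h0 : PySem.Int.mod i 3 = 0
    · simp only [h0]
      rw [ih]
      simp [pvCatB, String.append_assoc]
    · by_cases h1 : PySem.Int.mod i 3 = 1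
      · simp only [h1]
        rw [ih]
        simp [pvCatB, String.append_assoc]
      · have hge := PySem.Int.mod_nonneg i (b := 3) (by omega)
        have hlt := PySem.Int.mod_lt i (b := 3) (by omega)
        have h2 : PySem.Int.mod i 3 = 2 := by omega
        simp only [h2]
        rw [ih]
        simp [pvCatB, String.append_assoc]

-- the positions of residue k among 0..N-1, at the Nat level
theorem pvFilterNatCore (k : Nat) (hk : k < 3) : ∀ (N : Nat),
    (List.range N).filter (fun t => t % 3 == k) =
      (List.range ((N - k + 2) / 3)).map (fun t => k + 3 * t) := by
  intro N
  induction N with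
  | zero => simp
  | succ n ih =>
    rw [List.range_succ, List.filter_append, ih]
    by_cases h : n % 3 = k
    · have hc : (n + 1 - k + 2) / 3 = (n - k + 2) / 3 + 1 := by omega
      have hl : k + 3 * ((n - k + 2) / 3) = n := by omega
      rw [hc, List.range_succ, List.map_append]
      simp [h, hl]
    · have hc : (n + 1 - k + 2) / 3 = (n - k + 2) / 3 := by omega
      rw [hc]
      simp [h]

theorem pvFilterNat (k : Nat) (hk : k < 3) (N : Nat) :
    ((List.range N).map (fun t : Nat => (t : Int))).filter (fun i => PySem.Int.mod i 3 == (k : Int)) =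
      (List.range ((N - k + 2) / 3)).map (fun t : Nat => ((k : Int) + 3 * t)) := by
  rw [List.filter_map]
  have hpred : (fun t : Nat => PySem.Int.mod (t : Int) 3 == (k : Int)) = (fun t : Nat => t % 3 == k) := by
    funext t
    rw [PySem.Int.mod_eq_emod_of_pos (by omega : (0:Int) < 3)]
    by_cases h : t % 3 = k <;> simp [h] <;> omega
  simp only [Function.comp_def]
  rw [hpred]
  rw [pvFilterNatCore k hk N, List.map_map]
  simp

-- filtering the 1-step range by residue yields A's strided range
theorem pvFilter_range (M k : Int) (hk0 : 0 ≤ k) (hk3 : k < 3) :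
    (PySem.List.pyRange 0 M 1).filter (fun i => PySem.Int.mod i 3 == k) = PySem.List.pyRange k M 3 := by
  rw [PySem.List.pyRange_one, PySem.List.pyRange_of_pos _ _ (by omega : (0:Int) < 3)]
  have h1 : (List.range (M - 0).toNat).map (fun t : Nat => (0 : Int) + t) = (List.range M.toNat).map (fun t : Nat => (t : Int)) := by simp
  rw [h1]
  rw [show k = ((k.toNat : Nat) : Int) by omega]
  rw [pvFilterNat k.toNat (by omega) M.toNat]
  have h2 : (if (k.toNat : Int) < M then ((M - k.toNat + 3 - 1) / 3).toNat else 0) = (M.toNat - k.toNat + 2) / 3 := by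
    split_ifs <;> omega
  rw [h2]

-- A's frame loop over range(k, n, 3) computes the codons at positions k, k+3, … below n-2
theorem pvFrameA_range (s : String) (k : Int) (hk0 : 0 ≤ k) (hk3 : k < 3) :
    pvFrameA pvDictA s (PySem.List.pyRange k (s.toList.length : Int) 3) "" =
      pvCat s (PySem.List.pyRange k ((s.toList.length : Int) - 2) 3) := by
  rw [PySem.List.pyRange_of_pos _ _ (by omega : (0:Int) < 3),
      PySem.List.pyRange_of_pos _ _ (by omega : (0:Int) < 3)]
  set n : Int := (s.toList.length : Int) with hn
  have hn0 : 0 ≤ n := by positivity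
  set c1 : Nat := if k < n then ((n - k + 3 - 1) / 3).toNat else 0 with hc1
  set c2 : Nat := if k < n - 2 then ((n - 2 - k + 3 - 1) / 3).toNat else 0 with hc2
  have hle : c2 ≤ c1 := by rw [hc1, hc2]; split_ifs <;> omega
  have hsplit : List.range c1 = List.range c2 ++ (List.range (c1 - c2)).map (fun t => c2 + t) := by
    rw [← List.range_add]; congr 1; omega
  rw [hsplit, List.map_append]
  rw [pvFrameA_full]
  · simp
  · intro j hj
    simp only [List.mem_map, List.mem_range] at hj
    obtain ⟨t, ht, rfl⟩ := hj
    constructor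
    · omega
    · rw [hc2] at ht
      split_ifs at ht <;> omega
  · intro q hq
    rcases h : (List.range (c1 - c2)).map (fun t => c2 + t) with _ | ⟨t0, _⟩
    · rw [h] at hq; simp at hq
    · have h0 : c1 - c2 ≠ 0 := by
        intro hz; rw [hz] at h; simp at h
      have ht0 : t0 = c2 + 0 := by
        rcases hz : c1 - c2 with _ | u
        · exact absurd hz h0
        · rw [hz] at h
          rw [List.range_succ_eq_map] at h
          simp at h
          omega
      rw [h] at hq
      simp only [List.map_cons, List.head?_cons, Option.some.injEq] at hq
      subst hq
      constructor
      · omega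
      · rw [ht0]
        rw [hc2]
        split_ifs <;> omega

-- the two concatenations agree on lists of full in-range codon positions (Pre_'s ACGT case)
theorem pvCat_eq (s : String) (hall : ∀ c ∈ s.toList, c ∈ (['A','C','G','T'] : List Char))
    (P : List Int) (hP : ∀ j ∈ P, 0 ≤ j ∧ j + 3 ≤ (s.toList.length : Int)) :
    pvCat s P = pvCatB s P := by
  induction P with
  | nil => rfl
  | cons j t ih =>
    obtain ⟨h0, h3⟩ := hP j (by simp)
    simp only [pvCat, pvCatB]
    rw [pvStep_eq s j h0 h3 hall, ih (fun x hx => hP x (List.mem_cons_of_mem _ hx))]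

theorem ORFtranslator_frames (s : String) :
    ORFtranslator s =
      [pvFrameA pvDictA s (PySem.List.pyRange 0 (PySem.Str.len s) 3) "",
       pvFrameA pvDictA s (PySem.List.pyRange 1 (PySem.Str.len s) 3) "",
       pvFrameA pvDictA s (PySem.List.pyRange 2 (PySem.Str.len s) 3) ""] := by
  have h : PySem.List.pyRange 0 3 1 = [0, 1, 2] := by decide
  simp [ORFtranslator, h]

-- ===== VERDICT (by name: the statement is the Claim_ definition above) =====
theorem ORFtranslator_spec : Claim_equal_ORFtranslator := by
  unfold Claim_equal_ORFtranslator
  intro s _ hpre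
  unfold Spec_ORFtranslator
  simp only [ORFtranslator_alt]
  rw [pvFoldB]
  simp only [PySem.Str.len_eq]
  rw [pvFilter_range _ 0 le_rfl (by omega), pvFilter_range _ 1 (by omega) (by omega),
      pvFilter_range _ 2 (by omega) (by omega)]
  rw [ORFtranslator_frames]
  simp only [PySem.Str.len_eq]
  rw [pvFrameA_range s 0 le_rfl (by omega), pvFrameA_range s 1 (by omega) (by omega),
      pvFrameA_range s 2 (by omega) (by omega)]
  have hcat : ∀ k : Int, 0 ≤ k → k < 3 →
      pvCat s (PySem.List.pyRange k ((s.toList.length : Int) - 2) 3) =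
        pvCatB s (PySem.List.pyRange k ((s.toList.length : Int) - 2) 3) := by
    intro k hk0 hk3
    rcases hpre with hshort | hall
    · simp only [PySem.Str.len_eq] at hshort
      rw [PySem.List.pyRange_of_pos _ _ (by omega : (0:Int) < 3)]
      rw [if_neg (by omega)]
      rfl
    · apply pvCat_eq s
      · intro c hcmem
        have := List.all_eq_true.mp hall c hcmem
        simpa using this
      · intro j hj
        have := (PySem.List.mem_pyRange_iff_of_pos (by omega : (0:Int) < 3) j).mp hj
        omega
  rw [hcat 0 le_rfl (by omega), hcat 1 (by omega) (by omega), hcat 2 (by omega) (by omega)]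
  simp
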